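-- pv_equiv track=rewrite | github.com/scrollDynasty/findnews | test.py | find_shortest_word
-- ===== SOURCE A (Python) =====
-- def find_shortest_word(word, string):
--     words = string.split()
--     shortest_word = None
--     shortest_word_len = float("inf")
--
--     for w in words:
--         if w.startswith(word) and len(w) < shortest_word_len:
--             shortest_word = w
--             shortest_word_len = len(w)
--
--     return shortest_word
-- ===== SOURCE B (Python) =====
-- def find_shortest_word(word, string):
--     sorted_words = sorted(string.split(), key=len)
--     for w in sorted_words:
--         if w.startswith(word):
--             return w
--     return None
-- ===== Notes on version B (the rewrite author's own statement) =====
-- stated objective: alternative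
-- what changed: B stably sorts the words by length and returns the first one with the prefix, instead of A's single-pass strict-minimum scan tracking a running shortest length.
import Mathlib
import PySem

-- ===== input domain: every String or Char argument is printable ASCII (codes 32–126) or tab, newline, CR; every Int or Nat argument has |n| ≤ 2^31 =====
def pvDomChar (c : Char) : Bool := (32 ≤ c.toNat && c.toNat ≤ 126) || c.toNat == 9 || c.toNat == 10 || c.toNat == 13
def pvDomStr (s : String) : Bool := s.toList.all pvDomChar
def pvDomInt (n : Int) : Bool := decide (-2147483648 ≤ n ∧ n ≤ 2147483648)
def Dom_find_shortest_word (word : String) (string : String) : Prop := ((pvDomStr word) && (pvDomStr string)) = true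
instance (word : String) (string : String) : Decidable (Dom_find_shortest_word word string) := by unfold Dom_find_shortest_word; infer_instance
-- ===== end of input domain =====

-- B replaces A's one-pass running-shortest scan by a stable sort on length followed by a
-- first-match scan (alternative decomposition, same return value).

-- ===== PORT A =====
-- state = (shortest_word, shortest_word_len); shortest_word_len = none models float("inf")
def find_shortest_word (word : String) (string : String) : Option String :=
  let words := PySem.Str.split₀ string
  let st := words.foldl
    (fun (st : Option String × Option Int) w =>
      if PySem.Str.startswith w word &&
         (match st.2 with
          | none => true                          -- len(w) < inf
          | some l => decide (PySem.Str.len w < l))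
      then (some w, some (PySem.Str.len w))
      else st)
    (none, none)
  st.1

-- ===== PORT B =====
def find_shortest_word_alt (word : String) (string : String) : Option String :=
  let sorted_words := PySem.List.sorted (PySem.Str.split₀ string) (fun w => PySem.Str.len w) false
  sorted_words.find? (fun w => PySem.Str.startswith w word)

-- ===== PRECONDITION & SPEC =====
def Spec_find_shortest_word (word : String) (string : String) (out : Option String) : Prop := out = find_shortest_word_alt word string
instance (word : String) (string : String) (out : Option String) : Decidable (Spec_find_shortest_word word string out) := by unfold Spec_find_shortest_word; infer_instance

-- ===== CLAIM (what is proved, stated in full; the proofs are below) =====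
def Claim_equal_find_shortest_word : Prop := ∀ (word : String) (string : String), Dom_find_shortest_word word string → Spec_find_shortest_word word string (find_shortest_word word string)

-- ===== LEMMAS AND PROOFS =====

-- A's loop body on the first component only (the Option String accumulator).
def pvMerge (p : String → Bool) (k : String → Int) (o : Option String) (w : String) : Option String :=
  if p w && (match o with | none => true | some u => decide (k w < k u)) then some w else o

-- A's paired fold carries (o, o.map k) and its first component is the pvMerge fold.
theorem pvFoldA_eq (p : String → Bool) (k : String → Int) :
    ∀ (ws : List String) (o : Option String),
      ws.foldl
        (fun (st : Option String × Option Int) w =>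
          if p w && (match st.2 with | none => true | some l => decide (k w < l))
          then (some w, some (k w)) else st)
        (o, o.map k)
      = (ws.foldl (pvMerge p k) o, (ws.foldl (pvMerge p k) o).map k) := by
  intro ws
  induction ws with
  | nil => intro o; rfl
  | cons w ws ih =>
    intro o
    simp only [List.foldl_cons, pvMerge]
    cases o with
    | none =>
      by_cases hp : p w = true
      · simpa [hp] using ih (some w)
      · simpa [hp] using ih none
    | some u =>
      simp only [Option.map_some]
      by_cases h : (p w && decide (k w < k u)) = true
      · simp only [h]
        simpa [pvMerge] using ih (some w)
      · simp only [h]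
        simpa [pvMerge] using ih (some u)

-- Inserting w into a length-sorted list commutes find? with pvMerge.
theorem pvFind_insertBy (p : String → Bool) (k : String → Int) (w : String) :
    ∀ (acc : List String), acc.Pairwise (fun a b => k a ≤ k b) →
      (PySem.List.insertBy (fun a b => decide (k a < k b)) w acc).find? p
        = pvMerge p k (acc.find? p) w := by
  intro acc
  induction acc with
  | nil =>
    intro _
    simp [PySem.List.insertBy, pvMerge, List.find?]
  | cons y t ih =>
    intro hpw
    have hsorted : t.Pairwise (fun a b => k a ≤ k b) := hpw.tail
    have hy : ∀ z ∈ t, k y ≤ k z := fun z hz => (List.pairwise_cons.mp hpw).1 z hz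
    by_cases hlt : k w < k y
    · -- w goes in front
      simp only [PySem.List.insertBy, decide_eq_true_eq, if_pos hlt]
      by_cases hmatch : p w = true
      · -- first match is w; pvMerge also yields w since any find? result has key ≥ k y > k w
        have hmerge : pvMerge p k ((y :: t).find? p) w = some w := by
          unfold pvMerge
          cases hf : (y :: t).find? p with
          | none => simp [hmatch]
          | some u =>
            have hu : u ∈ y :: t := List.mem_of_find?_eq_some hf
            have hku : k y ≤ k u := by
              rcases List.mem_cons.mp hu with h | h
              · exact h ▸ le_refl _
              · exact hy u h
            have hwu : k w < k u := lt_of_lt_of_le hlt hku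
            simp [hmatch, hwu]
        rw [hmerge]
        simp [List.find?, hmatch]
      · -- w does not match: find? skips it; pvMerge leaves the accumulator unchanged
        have hb : p w = false := by simpa using hmatch
        simp [List.find?, hb, pvMerge]
    · -- w goes after y
      simp only [PySem.List.insertBy, decide_eq_true_eq, if_neg hlt]
      by_cases hpy : p y = true
      · -- y is the first match on both sides; pvMerge keeps some y since ¬ k w < k y
        simp [List.find?, hpy, pvMerge, hlt]
      · have hb : p y = false := by simpa using hpy
        simp only [List.find?, hb]
        exact ih hsorted

-- find? over the stable insertion sort equals A's left-to-right strict-minimum fold.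
theorem pvFind_sorted (p : String → Bool) (k : String → Int) (ws : List String) :
    (PySem.List.sorted ws k false).find? p = ws.foldl (pvMerge p k) none := by
  induction ws using List.reverseRecOn with
  | nil => rfl
  | append_singleton ws w ih =>
    have hs : PySem.List.sorted (ws ++ [w]) k false
        = PySem.List.insertBy (fun a b => decide (k a < k b)) w (PySem.List.sorted ws k false) := by
      rw [PySem.List.sorted_eq_foldl_insertBy, PySem.List.sorted_eq_foldl_insertBy,
        List.foldl_append]
      rfl
    rw [hs, pvFind_insertBy p k w _ (PySem.List.sorted_pairwise ws k),
      ih, List.foldl_append]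
    rfl

-- ===== VERDICT (by name: the statement is the Claim_ definition above) =====
theorem find_shortest_word_spec : Claim_equal_find_shortest_word := by
  intro word string _
  have hA := pvFoldA_eq (fun w => PySem.Str.startswith w word) (fun w => PySem.Str.len w)
    (PySem.Str.split₀ string) none
  simp only [Option.map_none] at hA
  simp only [Spec_find_shortest_word, find_shortest_word, find_shortest_word_alt, hA]
  exact (pvFind_sorted (fun w => PySem.Str.startswith w word) (fun w => PySem.Str.len w)
    (PySem.Str.split₀ string)).symm
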